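-- pv_equiv track=rewrite | github.com/ks24pon/Recursion_Python_coding | easy/sample64.py | doubledArray
-- ===== SOURCE A (Python) =====
-- def doubledArray(arr):
--     # ベースケース１:要素が1つなら2倍にして返す
--     if len(arr) == 1:
--         return [arr[0] * 2]
--
--     # ベースケース2：空配列ならそのまま返す
--     if len(arr) == 0:
--         return []
--
--     # 配列を中央で分割
--     mid = len(arr) // 2
--     left = arr[:mid] #左半分
--     right = arr[mid:] # 右半分
--
--     # 左右を再帰的に処理して、結果を結合
--     return doubledArray(left) + doubledArray(right)
-- ===== SOURCE B (Python) =====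
-- def doubledArray(arr):
--     # Iterative single pass with an explicit accumulator instead of
--     # A's divide-and-conquer recursion.
--     result = []
--     for x in arr:
--         result.append(x * 2)
--     return result
-- ===== Notes on version B (the rewrite author's own statement) =====
-- stated objective: faster
-- what changed: Replaces A's divide-and-conquer recursion (halving the list via slices and concatenating recursive results) with a single iterative pass appending each doubled element to an accumulator list.
import Mathlib
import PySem

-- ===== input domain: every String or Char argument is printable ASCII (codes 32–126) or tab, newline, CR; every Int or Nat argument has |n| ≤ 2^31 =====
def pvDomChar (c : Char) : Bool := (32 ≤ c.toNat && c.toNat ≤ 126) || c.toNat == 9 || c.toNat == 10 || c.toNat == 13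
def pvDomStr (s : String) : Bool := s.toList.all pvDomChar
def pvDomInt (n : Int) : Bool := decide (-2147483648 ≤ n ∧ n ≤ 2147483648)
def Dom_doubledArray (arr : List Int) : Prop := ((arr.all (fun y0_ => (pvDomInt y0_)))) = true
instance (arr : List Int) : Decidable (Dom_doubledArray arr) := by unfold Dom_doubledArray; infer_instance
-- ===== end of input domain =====

-- B replaces A's divide-and-conquer recursion by one iterative accumulator pass (same output).

-- ===== PORT A =====
-- Python slices arr[:mid] / arr[mid:] with 0 ≤ mid ≤ len are List.take / List.drop
-- (exactly PySem.List.slice_to / slice_from); len(arr) // 2 on a Nat length is Nat division.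
def doubledArray (arr : List Int) : List Int :=
  if arr.length = 1 then
    [arr.headI * 2]   -- arr[0]; the guard guarantees the list is nonempty, so headI is exact
  else if arr.length = 0 then
    []
  else
    let mid := arr.length / 2
    doubledArray (arr.take mid) ++ doubledArray (arr.drop mid)
termination_by arr.length
decreasing_by
  · simp only [List.length_take]; omega
  · simp only [List.length_drop]; omega

-- ===== PORT B =====
def doubledArray_alt (arr : List Int) : List Int :=
  arr.foldl (fun result x => result ++ [x * 2]) []

-- ===== PRECONDITION & SPEC =====
def Spec_doubledArray (arr : List Int) (out : List Int) : Prop := out = doubledArray_alt arr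
instance (arr : List Int) (out : List Int) : Decidable (Spec_doubledArray arr out) := by unfold Spec_doubledArray; infer_instance

-- ===== CLAIM (what is proved, stated in full; the proofs are below) =====
def Claim_equal_doubledArray : Prop := ∀ (arr : List Int), Dom_doubledArray arr → Spec_doubledArray arr (doubledArray arr)

-- ===== LEMMAS AND PROOFS =====

theorem alt_foldl_eq_map (arr : List Int) (acc : List Int) :
    arr.foldl (fun result x => result ++ [x * 2]) acc = acc ++ arr.map (fun x => x * 2) := by
  induction arr generalizing acc with
  | nil => simp
  | cons a t ih => simp [List.foldl, ih]

theorem doubledArray_eq_map (arr : List Int) : doubledArray arr = arr.map (fun x => x * 2) := by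
  rw [doubledArray]
  split
  · next h =>
    obtain ⟨a, rfl⟩ := List.length_eq_one_iff.mp h
    simp
  · split
    · next h => simp [List.length_eq_zero_iff.mp h]
    · show doubledArray (arr.take (arr.length / 2)) ++ doubledArray (arr.drop (arr.length / 2)) =
          arr.map (fun x => x * 2)
      rw [doubledArray_eq_map, doubledArray_eq_map, ← List.map_append, List.take_append_drop]
termination_by arr.length
decreasing_by
  · simp only [List.length_take]; omega
  · simp only [List.length_drop]; omega

-- ===== VERDICT (by name: the statement is the Claim_ definition above) =====
theorem doubledArray_spec : Claim_equal_doubledArray := by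
  intro arr _
  unfold Spec_doubledArray doubledArray_alt
  rw [alt_foldl_eq_map, doubledArray_eq_map]
  simp
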